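-- pv_equiv track=rewrite | github.com/PiErr0r/aoc | 2017/24.py | find_ports
-- ===== SOURCE A (Python) =====
-- def rl(arr):
-- 	return range(len(arr))
--
-- def calc_str(ports, used):
-- 	S = 0
--
-- 	for i in used:
-- 		S += ports[i][0] + ports[i][1]
-- 	return S
--
-- def find_ports(first, ports, used):
-- 	found = False
-- 	mx = strm = 0
-- 	for i in rl(ports):
-- 		if i in used:
-- 			continue
-- 		p = ports[i]
-- 		fst = p[0] == first
-- 		snd = p[1] == first
-- 		if fst or snd:
-- 			found = True
-- 			used |= {i}
-- 			curr_s, curr_l = find_ports(p[1] if fst else p[0], ports, used)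
-- 			if curr_l > mx:
-- 				mx = curr_l
-- 				strm = curr_s
-- 			elif curr_l == mx and curr_s > strm:
-- 				strm = curr_s
-- 			used -= {i}
-- 	if not found:
-- 		S = calc_str(ports, used)
-- 		return S, len(used)
-- 	return strm, mx
-- ===== SOURCE B (Python) =====
-- def find_ports(first, ports, used):
--     base = sum(ports[i][0] + ports[i][1] for i in used)
--     best = None
--     stack = [(first, set(used), len(used), base)]
--     while stack:
--         e, u, l, s = stack.pop()
--         matched = False
--         for i, (a, b) in enumerate(ports):
--             if i in u or (a != e and b != e):
--                 continue
--             matched = True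
--             stack.append((b if a == e else a, u | {i}, l + 1, s + a + b))
--         if not matched:
--             if best is None or (l, s) > best:
--                 best = (l, s)
--     return best[1], best[0]
-- ===== Notes on version B (the rewrite author's own statement) =====
-- stated objective: alternative
-- what changed: Replaced A's recursive backtracking DFS (mutate-recurse-restore over a shared used set, per-call found/mx/strm loop, leaf strength recomputed by calc_str) with an iterative DFS over an explicit stack of frames that carry the endpoint, their own used set and incrementally maintained (length, strength); completed bridges update a single running lexicographic best, returned as (strength, length).
-- outside the precondition, e.g. on find_ports(0, [], {5}): A raises IndexError, B raises IndexError
import Mathlib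
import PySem

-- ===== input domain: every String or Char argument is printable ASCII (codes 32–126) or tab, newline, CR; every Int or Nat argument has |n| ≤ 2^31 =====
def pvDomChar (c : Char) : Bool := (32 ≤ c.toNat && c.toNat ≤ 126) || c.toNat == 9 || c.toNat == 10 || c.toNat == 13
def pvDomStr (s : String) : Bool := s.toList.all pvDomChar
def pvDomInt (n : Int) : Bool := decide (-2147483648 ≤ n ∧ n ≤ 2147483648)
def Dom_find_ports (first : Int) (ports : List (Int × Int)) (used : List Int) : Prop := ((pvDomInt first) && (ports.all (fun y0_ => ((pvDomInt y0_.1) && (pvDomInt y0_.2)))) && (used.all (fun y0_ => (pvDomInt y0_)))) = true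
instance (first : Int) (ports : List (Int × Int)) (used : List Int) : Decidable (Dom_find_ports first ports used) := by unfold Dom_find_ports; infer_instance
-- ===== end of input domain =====

-- B rewrites A's recursive backtracking DFS as an iterative DFS over an explicit stack of frames
-- carrying (endpoint, own used set, length, strength), with a single running lexicographic best
-- (objective: alternative decomposition). A temporarily mutates `used`, restoring it before every
-- normal return (only a raising call, excluded by Pre_, leaves the mutation visible); the
-- equivalence proved here is about the RETURN value.

-- number of indices of `range n` not yet in `u` (fuel bound for A / termination measure for B)
def ucount (n : Nat) (u : List Int) : Nat :=
  ((List.range n).filter (fun j => !(u.contains ((j : Nat) : Int)))).length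

-- ===== PORT A =====
def rl (arr : List (Int × Int)) : List Int := PySem.List.pyRange 0 (arr.length : Int) 1

def calc_str (ports : List (Int × Int)) (used : List Int) : Int :=
  used.foldl (fun S i =>
    S + (PySem.List.pyGetD ports i (0, 0)).1 + (PySem.List.pyGetD ports i (0, 0)).2) 0

-- A's recursion, with fuel as a totality guard only: `find_ports` supplies fuel exceeding the
-- recursion depth (each call adds one unused in-range index to `used`), so the 0-fuel branch is
-- never reached from `find_ports`.
def goA : Nat → Int → List (Int × Int) → List Int → Int × Int
  | 0, _, _, _ => (0, 0)
  | fuel + 1, first, ports, used =>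
    let st := (rl ports).foldl (fun (acc : Bool × Int × Int) i =>
      if used.contains i then acc
      else
        let p := PySem.List.pyGetD ports i (0, 0)
        let fst := p.1 == first
        let snd := p.2 == first
        if fst || snd then
          let r := goA fuel (if fst then p.2 else p.1) ports (PySem.Set.add used i)
          if r.2 > acc.2.1 then (true, r.2, r.1)
          else if r.2 = acc.2.1 ∧ r.1 > acc.2.2 then (true, acc.2.1, r.1)
          else (true, acc.2.1, acc.2.2)
        else acc) (false, 0, 0)
    if !st.1 then (calc_str ports used, (used.length : Int))
    else (st.2.2, st.2.1)

def find_ports (first : Int) (ports : List (Int × Int)) (used : List Int) : Int × Int :=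
  goA (ucount ports.length used + 1) first ports used

-- ===== PORT B =====
-- base = sum(ports[i][0] + ports[i][1] for i in used)
def baseStr (ports : List (Int × Int)) (used : List Int) : Int :=
  (used.map (fun i => (PySem.List.pyGetD ports i (0, 0)).1 + (PySem.List.pyGetD ports i (0, 0)).2)).sum

-- the frames pushed while scanning `enumerate(ports)`; the head is the last push (= next pop)
def pushChildren (ports : List (Int × Int)) (e : Int) (u : List Int) (l s : Int) :
    List (Int × List Int × Int × Int) :=
  (PySem.List.enumerate ports 0).foldl (fun acc ip =>
    if u.contains ip.1 || (!(ip.2.1 == e) && !(ip.2.2 == e)) then acc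
    else ((if ip.2.1 == e then ip.2.2 else ip.2.1),
          PySem.Set.add u ip.1, l + 1, s + ip.2.1 + ip.2.2) :: acc) []

-- if best is None or (l, s) > best: best = (l, s)
def bstep (best : Option (Int × Int)) (v : Int × Int) : Option (Int × Int) :=
  match best with
  | none => some v
  | some w => if w.1 < v.1 ∨ (w.1 = v.1 ∧ w.2 < v.2) then some v else some w


-- the while-stack loop of B, with fuel as a totality guard only: `find_ports_alt` supplies
-- fuel exceeding the number of loop iterations (the stack measure proved below strictly
-- decreases), so the 0-fuel branch is never reached from `find_ports_alt`.
def goB (ports : List (Int × Int)) :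
    Nat → List (Int × List Int × Int × Int) → Option (Int × Int) → Int × Int
  | 0, _, _ => (0, 0)
  | _ + 1, [], best =>
    match best with
    | some ls => (ls.2, ls.1)
    | none => (0, 0)
  | fuel + 1, f :: rest, best =>
    let ch := pushChildren ports f.1 f.2.1 f.2.2.1 f.2.2.2
    if ch = [] then goB ports fuel rest (bstep best (f.2.2.1, f.2.2.2))
    else goB ports fuel (ch ++ rest) best

def find_ports_alt (first : Int) (ports : List (Int × Int)) (used : List Int) : Int × Int :=
  goB ports ((ports.length + 1) ^ ucount ports.length used + 1)
    [(first, used, (used.length : Int), baseStr ports used)] none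

-- ===== PRECONDITION & SPEC =====
-- Pre_ excludes (a) `used` containing an index outside Python's index range for `ports` (A raises
-- IndexError in calc_str; B's initial sum raises the same way), and (b) lists with duplicate
-- elements, which no Python `set` argument can produce (not a valid encoding of any input).
def Pre_find_ports (first : Int) (ports : List (Int × Int)) (used : List Int) : Prop :=
  (∀ i ∈ used, PySem.Raise.InRange ports.length i) ∧ used.Nodup
instance (first : Int) (ports : List (Int × Int)) (used : List Int) :
    Decidable (Pre_find_ports first ports used) := by unfold Pre_find_ports; infer_instance

def pvWitness_find_ports : Int × (List (Int × Int)) × List Int :=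
  (3, [(1, 3), (3, 2), (2, 1)], [1])

def Spec_find_ports (first : Int) (ports : List (Int × Int)) (used : List Int) (out : Int × Int) : Prop := out = find_ports_alt first ports used
instance (first : Int) (ports : List (Int × Int)) (used : List Int) (out : Int × Int) : Decidable (Spec_find_ports first ports used out) := by unfold Spec_find_ports; infer_instance

-- ===== CLAIM (what is proved, stated in full; the proofs are below) =====
def Claim_equal_find_ports : Prop := ∀ (first : Int) (ports : List (Int × Int)) (used : List Int), Dom_find_ports first ports used → Pre_find_ports first ports used → Spec_find_ports first ports used (find_ports first ports used)

-- ===== LEMMAS AND PROOFS =====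

-- fuel-sufficiency lemmas for B's while loop (the stack measure strictly decreases)
theorem foldl_consIf {α β : Type} (p : α → Bool) (f : α → β) (l : List α) (acc : List β) :
    l.foldl (fun acc x => if p x then acc else f x :: acc) acc
      = ((l.filter (fun x => !(p x))).map f).reverse ++ acc := by
  induction l generalizing acc with
  | nil => simp
  | cons x xs ih => by_cases h : p x <;> simp [h, ih]

theorem pushChildren_eq (ports : List (Int × Int)) (e : Int) (u : List Int) (l s : Int) :
    pushChildren ports e u l s =
      (((PySem.List.enumerate ports 0).filter
          (fun ip => !(u.contains ip.1 || (!(ip.2.1 == e) && !(ip.2.2 == e))))).map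
        (fun ip => ((if ip.2.1 == e then ip.2.2 else ip.2.1),
          PySem.Set.add u ip.1, l + 1, s + ip.2.1 + ip.2.2))).reverse ++ [] := by
  unfold pushChildren
  exact foldl_consIf _ _ _ _

theorem pushChildren_mem (ports : List (Int × Int)) (e : Int) (u : List Int) (l s : Int)
    (f : Int × List Int × Int × Int) (hf : f ∈ pushChildren ports e u l s) :
    ∃ k : Nat, k < ports.length ∧ u.contains ((k : Nat) : Int) = false ∧
      f.2.1 = u ++ [((k : Nat) : Int)] := by
  rw [pushChildren_eq] at hf
  simp only [List.append_nil, List.mem_reverse, List.mem_map, List.mem_filter] at hf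
  obtain ⟨ip, ⟨hmem, hpred⟩, rfl⟩ := hf
  rw [PySem.List.mem_enumerate_iff] at hmem
  obtain ⟨k, hk, rfl⟩ := hmem
  refine ⟨k, hk, ?_, ?_⟩
  · simp at hpred; simpa using hpred.1
  · simp at hpred
    simp [PySem.Set.add, hpred.1]

theorem ucount_filter_aux (n k : Nat) (u : List Int) (hk : k < n) (hu : u.contains ((k : Nat) : Int) = false) :
    ucount n (u ++ [((k : Nat) : Int)]) + 1 = ucount n u := by
  unfold ucount
  have hku : ((k : Nat) : Int) ∉ u := by
    intro h; rw [← List.elem_eq_contains] at hu; simp at hu; exact hu h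
  have hmem : k ∈ (List.range n).filter (fun j => !(u.contains ((j : Nat) : Int))) := by
    simp [List.mem_filter, List.mem_range, hk]; exact hku
  have hnd : ((List.range n).filter (fun j => !(u.contains ((j : Nat) : Int)))).Nodup :=
    (List.nodup_range).filter _
  have h1 : (List.range n).filter (fun j => !((u ++ [((k : Nat) : Int)]).contains ((j : Nat) : Int)))
      = ((List.range n).filter (fun j => !(u.contains ((j : Nat) : Int)))).filter (fun j => j != k) := by
    rw [List.filter_filter]
    apply List.filter_congr
    intro j hj
    simp only [List.contains_append, Bool.not_or]
    have h2 : (([((k : Nat) : Int)]).contains ((j : Nat) : Int)) = (j == k) := by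
      by_cases h : j = k <;> simp [h]
    rw [h2]
    simp [bne, Bool.and_comm]
  rw [h1, ← List.Nodup.erase_eq_filter hnd, List.length_erase_of_mem hmem]
  have : 0 < ((List.range n).filter (fun j => !(u.contains ((j : Nat) : Int)))).length :=
    List.length_pos_of_mem hmem
  omega

theorem pushChildren_mem_ucount (ports : List (Int × Int)) (e : Int) (u : List Int) (l s : Int)
    (f : Int × List Int × Int × Int) (hf : f ∈ pushChildren ports e u l s) :
    ucount ports.length f.2.1 + 1 = ucount ports.length u := by
  obtain ⟨k, hk, hc, hfu⟩ := pushChildren_mem ports e u l s f hf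
  rw [hfu]
  exact ucount_filter_aux ports.length k u hk hc

theorem pushChildren_length_le (ports : List (Int × Int)) (e : Int) (u : List Int) (l s : Int) :
    (pushChildren ports e u l s).length ≤ ports.length := by
  rw [pushChildren_eq]
  simp only [List.append_nil, List.length_reverse, List.length_map]
  calc _ ≤ (PySem.List.enumerate ports 0).length := List.length_filter_le _ _
    _ = ports.length := PySem.List.length_enumerate ports 0

theorem goB_measure_lt (ports : List (Int × Int)) (e : Int) (u : List Int) (l s : Int)
    (rest : List (Int × List Int × Int × Int)) (h : pushChildren ports e u l s ≠ []) :
    ((pushChildren ports e u l s ++ rest).map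
        (fun fr => (ports.length + 1) ^ ucount ports.length fr.2.1)).sum <
      (((e, u, l, s) :: rest).map
        (fun fr => (ports.length + 1) ^ ucount ports.length fr.2.1)).sum := by
  obtain ⟨f0, hf0⟩ := List.exists_mem_of_ne_nil (pushChildren ports e u l s) h
  have hk1 : 1 ≤ ucount ports.length u := by
    have := pushChildren_mem_ucount ports e u l s f0 hf0; omega
  have hconst : ∀ fr ∈ pushChildren ports e u l s,
      (ports.length + 1) ^ ucount ports.length fr.2.1
        = (ports.length + 1) ^ (ucount ports.length u - 1) := by
    intro fr hfr
    have := pushChildren_mem_ucount ports e u l s fr hfr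
    congr 1; omega
  have hsum : ((pushChildren ports e u l s).map
      (fun fr => (ports.length + 1) ^ ucount ports.length fr.2.1)).sum
      = (pushChildren ports e u l s).length * (ports.length + 1) ^ (ucount ports.length u - 1) := by
    rw [List.map_congr_left hconst]
    simp [List.map_const', List.sum_replicate]
  have hlen : (pushChildren ports e u l s).length ≤ ports.length := pushChildren_length_le ports e u l s
  have hpow : (pushChildren ports e u l s).length * (ports.length + 1) ^ (ucount ports.length u - 1)
      < (ports.length + 1) ^ ucount ports.length u := by
    have hp1 : 1 ≤ (ports.length + 1) ^ (ucount ports.length u - 1) := Nat.one_le_pow _ _ (by omega)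
    have hps : (ports.length + 1) ^ ucount ports.length u
        = (ports.length + 1) ^ (ucount ports.length u - 1) * (ports.length + 1) := by
      rw [← pow_succ]; congr 1; omega
    rw [hps]
    calc (pushChildren ports e u l s).length * (ports.length + 1) ^ (ucount ports.length u - 1)
        ≤ ports.length * (ports.length + 1) ^ (ucount ports.length u - 1) :=
          Nat.mul_le_mul_right _ hlen
      _ < (ports.length + 1) ^ (ucount ports.length u - 1) * (ports.length + 1) := by nlinarith
  simp only [List.map_append, List.sum_append, List.map_cons, List.sum_cons]
  omega


-- the matching unused ports, as A's loop and B's scan both select them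
def mlist (ports : List (Int × Int)) (e : Int) (u : List Int) : List (Int × (Int × Int)) :=
  (PySem.List.enumerate ports 0).filter
    (fun ip => !(u.contains ip.1 || (!(ip.2.1 == e) && !(ip.2.2 == e))))

-- lexicographic maximum of two (length, strength) pairs (ties keep the left one)
def lmax (w v : Int × Int) : Int × Int :=
  if w.1 < v.1 ∨ (w.1 = v.1 ∧ w.2 < v.2) then v else w

-- A's value at canonical fuel
def AV (ports : List (Int × Int)) (e : Int) (u : List Int) : Int × Int :=
  goA (ucount ports.length u + 1) e ports u

theorem lmax_comm (a b : Int × Int) : lmax a b = lmax b a := by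
  unfold lmax; split_ifs <;> first | rfl | (apply Prod.ext <;> omega)

theorem lmax_assoc (a b c : Int × Int) : lmax (lmax a b) c = lmax a (lmax b c) := by
  unfold lmax; split_ifs <;> first | rfl | (apply Prod.ext <;> omega)

theorem lmax_fst_le_left (a b : Int × Int) : a.1 ≤ (lmax a b).1 := by
  unfold lmax; split_ifs <;> omega

theorem lmax_fst_le_right (a b : Int × Int) : b.1 ≤ (lmax a b).1 := by
  unfold lmax; split_ifs <;> omega

def nxt (e : Int) (ip : Int × (Int × Int)) : Int := if ip.2.1 == e then ip.2.2 else ip.2.1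

def chU (u : List Int) (ip : Int × (Int × Int)) : List Int := PySem.Set.add u ip.1

-- the (length, strength) value a child call contributes, at fuel `fuel`
def valG (fuel : Nat) (ports : List (Int × Int)) (e : Int) (u : List Int)
    (ip : Int × (Int × Int)) : Int × Int :=
  ((goA fuel (nxt e ip) ports (chU u ip)).2, (goA fuel (nxt e ip) ports (chU u ip)).1)

def updA (fuel : Nat) (ports : List (Int × Int)) (e : Int) (u : List Int)
    (acc : Bool × Int × Int) (ip : Int × (Int × Int)) : Bool × Int × Int :=
  (true, lmax acc.2 (valG fuel ports e u ip))

theorem foldl_updA (fuel : Nat) (ports : List (Int × Int)) (e : Int) (u : List Int)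
    (l : List (Int × (Int × Int))) (b : Bool) (w : Int × Int) :
    l.foldl (updA fuel ports e u) (b, w)
      = (b || !l.isEmpty, (l.map (valG fuel ports e u)).foldl lmax w) := by
  induction l generalizing b w with
  | nil => simp
  | cons x xs ih =>
    simp only [List.foldl_cons, List.map_cons]
    rw [show updA fuel ports e u (b, w) x = (true, lmax w (valG fuel ports e u x)) from rfl, ih]
    simp

theorem goA_succ (fuel : Nat) (e : Int) (ports : List (Int × Int)) (u : List Int) :
    goA (fuel + 1) e ports u =
      (if mlist ports e u = [] then (calc_str ports u, (u.length : Int))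
       else
        ((((mlist ports e u).map (valG fuel ports e u)).foldl lmax (0, 0)).2,
         (((mlist ports e u).map (valG fuel ports e u)).foldl lmax (0, 0)).1)) := by
  show (let st := (rl ports).foldl _ (false, 0, 0);
        if !st.1 then (calc_str ports u, (u.length : Int)) else (st.2.2, st.2.1)) = _
  have hbody : ((rl ports).foldl (fun (acc : Bool × Int × Int) i =>
      if u.contains i then acc
      else
        let p := PySem.List.pyGetD ports i (0, 0)
        let fst := p.1 == e
        let snd := p.2 == e
        if fst || snd then
          let r := goA fuel (if fst then p.2 else p.1) ports (PySem.Set.add u i)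
          if r.2 > acc.2.1 then (true, r.2, r.1)
          else if r.2 = acc.2.1 ∧ r.1 > acc.2.2 then (true, acc.2.1, r.1)
          else (true, acc.2.1, acc.2.2)
        else acc) (false, 0, 0))
      = (mlist ports e u).foldl (updA fuel ports e u) (false, 0, 0) := by
    unfold mlist
    rw [List.foldl_filter]
    rw [PySem.List.enumerate_eq_map_pyRange ports (0, 0), List.foldl_map]
    apply PySem.List.foldl_congr_mem'
    intro j hj acc
    simp only []
    by_cases hc : j ∈ u
    · simp [hc]
    · by_cases h1 : (PySem.List.pyGetD ports j (0, 0)).1 = e <;>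
      by_cases h2 : (PySem.List.pyGetD ports j (0, 0)).2 = e <;>
      simp only [updA, valG, nxt, chU, lmax] <;>
      simp [hc, h1, h2, Prod.ext_iff] <;>
      split_ifs <;> simp_all <;> omega
  simp only [hbody, foldl_updA]
  by_cases hm : mlist ports e u = [] <;> simp [hm, List.isEmpty_iff]

theorem mlist_mem (ports : List (Int × Int)) (e : Int) (u : List Int)
    (ip : Int × (Int × Int)) (hip : ip ∈ mlist ports e u) :
    ∃ k : Nat, k < ports.length ∧ ip.1 = ((k : Nat) : Int) ∧ u.contains ((k : Nat) : Int) = false ∧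
      ip.2 = ports.getD k (0, 0) ∧ chU u ip = u ++ [((k : Nat) : Int)] := by
  unfold mlist at hip
  simp only [List.mem_filter] at hip
  obtain ⟨hmem, hpred⟩ := hip
  rw [PySem.List.mem_enumerate_iff] at hmem
  obtain ⟨k, hk, rfl⟩ := hmem
  have hc : u.contains ((k : Nat) : Int) = false := by
    simp at hpred; simpa using hpred.1
  refine ⟨k, hk, by simp, hc, ?_, ?_⟩
  · simp [List.getD, List.getElem?_eq_getElem hk]
  · unfold chU
    simp at hpred
    simp [PySem.Set.add, hpred.1]

theorem mlist_ucount_pos (ports : List (Int × Int)) (e : Int) (u : List Int)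
    (h : mlist ports e u ≠ []) : 1 ≤ ucount ports.length u := by
  obtain ⟨ip, hip⟩ := List.exists_mem_of_ne_nil _ h
  obtain ⟨k, hk, _, hc, _, _⟩ := mlist_mem ports e u ip hip
  have hku : ((k : Nat) : Int) ∉ u := by
    intro hmem; rw [← List.elem_eq_contains] at hc; simp at hc; exact hc hmem
  have : k ∈ (List.range ports.length).filter (fun j => !(u.contains ((j : Nat) : Int))) := by
    simp [List.mem_filter, List.mem_range, hk]; exact hku
  have := List.length_pos_of_mem this
  unfold ucount
  omega

theorem mlist_chU_ucount (ports : List (Int × Int)) (e : Int) (u : List Int)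
    (ip : Int × (Int × Int)) (hip : ip ∈ mlist ports e u) :
    ucount ports.length (chU u ip) + 1 = ucount ports.length u := by
  obtain ⟨k, hk, _, hc, _, hchU⟩ := mlist_mem ports e u ip hip
  rw [hchU]
  exact ucount_filter_aux ports.length k u hk hc

theorem goA_fuel (ports : List (Int × Int)) : ∀ (fuel : Nat) (e : Int) (u : List Int),
    ucount ports.length u < fuel → goA fuel e ports u = AV ports e u := by
  intro fuel
  induction fuel using Nat.strong_induction_on with
  | _ fuel ih =>
    intro e u hu
    obtain ⟨f, rfl⟩ : ∃ f, fuel = f + 1 := ⟨fuel - 1, by omega⟩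
    unfold AV
    rw [goA_succ, goA_succ]
    by_cases hm : mlist ports e u = []
    · simp [hm]
    · have hpos := mlist_ucount_pos ports e u hm
      have hmap : (mlist ports e u).map (valG f ports e u)
          = (mlist ports e u).map (valG (ucount ports.length u) ports e u) := by
        apply List.map_congr_left
        intro ip hipM
        have hcc := mlist_chU_ucount ports e u ip hipM
        unfold valG
        rw [ih f (by omega) _ _ (by omega),
          ih (ucount ports.length u) (by omega) _ _ (by omega)]
      rw [hmap]

-- the (length, strength) value of a child bridge, at canonical fuel
def valA (ports : List (Int × Int)) (e : Int) (u : List Int) (ip : Int × (Int × Int)) : Int × Int :=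
  ((AV ports (nxt e ip) (chU u ip)).2, (AV ports (nxt e ip) (chU u ip)).1)

theorem AV_eq (ports : List (Int × Int)) (e : Int) (u : List Int) :
    AV ports e u =
      (if mlist ports e u = [] then (calc_str ports u, (u.length : Int))
       else
        ((((mlist ports e u).map (valA ports e u)).foldl lmax (0, 0)).2,
         (((mlist ports e u).map (valA ports e u)).foldl lmax (0, 0)).1)) := by
  unfold AV
  rw [goA_succ]
  by_cases hm : mlist ports e u = []
  · simp [hm]
  · have hmap : (mlist ports e u).map (valG (ucount ports.length u) ports e u)
        = (mlist ports e u).map (valA ports e u) := by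
      apply List.map_congr_left
      intro ip hipM
      have hcc := mlist_chU_ucount ports e u ip hipM
      unfold valG valA
      rw [goA_fuel ports (ucount ports.length u) _ _ (by omega)]
    rw [hmap]

theorem foldl_lmax_ge_init (l : List (Int × Int)) (a : Int × Int) :
    a.1 ≤ (l.foldl lmax a).1 := by
  induction l generalizing a with
  | nil => simp
  | cons x xs ih => exact le_trans (lmax_fst_le_left a x) (ih (lmax a x))

theorem foldl_lmax_ge_mem (l : List (Int × Int)) (a v : Int × Int) (hv : v ∈ l) :
    v.1 ≤ (l.foldl lmax a).1 := by
  induction l generalizing a with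
  | nil => simp at hv
  | cons x xs ih =>
    rcases List.mem_cons.mp hv with rfl | hv'
    · exact le_trans (lmax_fst_le_right a v) (foldl_lmax_ge_init xs (lmax a v))
    · exact ih (lmax a x) hv'


theorem AV_snd_ge (ports : List (Int × Int)) : ∀ (N : Nat) (e : Int) (u : List Int),
    ucount ports.length u ≤ N → (u.length : Int) ≤ (AV ports e u).2 := by
  intro N
  induction N with
  | zero =>
    intro e u hN
    have hm : mlist ports e u = [] := by
      by_contra hne
      have := mlist_ucount_pos ports e u hne
      omega
    rw [AV_eq, if_pos hm]
  | succ N ihN =>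
    intro e u hN
    by_cases hm : mlist ports e u = []
    · rw [AV_eq, if_pos hm]
    · rw [AV_eq, if_neg hm]
      obtain ⟨ip0, hip0⟩ := List.exists_mem_of_ne_nil _ hm
      have hcc := mlist_chU_ucount ports e u ip0 hip0
      obtain ⟨k, hk, _, hc, _, hchU⟩ := mlist_mem ports e u ip0 hip0
      have hchild : ((chU u ip0).length : Int) ≤ (AV ports (nxt e ip0) (chU u ip0)).2 :=
        ihN (nxt e ip0) (chU u ip0) (by omega)
      have hlen : ((chU u ip0).length : Int) = (u.length : Int) + 1 := by
        rw [hchU]; simp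
      have hmemv : valA ports e u ip0 ∈ (mlist ports e u).map (valA ports e u) :=
        List.mem_map_of_mem hip0
      have := foldl_lmax_ge_mem _ ((0 : Int), (0 : Int)) _ hmemv
      have hv1 : (u.length : Int) + 1 ≤ (valA ports e u ip0).1 := by
        unfold valA; simp only []; omega
      simp only []
      omega

-- ---- B-side abstractions ----
def finB : Option (Int × Int) → Int × Int
  | some ls => (ls.2, ls.1)
  | none => (0, 0)

def stepB (ports : List (Int × Int)) (b : Option (Int × Int))
    (fr : Int × List Int × Int × Int) : Option (Int × Int) :=
  bstep b ((AV ports fr.1 fr.2.1).2, (AV ports fr.1 fr.2.1).1)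

def InvF (ports : List (Int × Int)) (fr : Int × List Int × Int × Int) : Prop :=
  fr.2.2.1 = (fr.2.1.length : Int) ∧ fr.2.2.2 = calc_str ports fr.2.1

theorem bstep_some (w v : Int × Int) : bstep (some w) v = some (lmax w v) := by
  show (if w.1 < v.1 ∨ (w.1 = v.1 ∧ w.2 < v.2) then some v else some w) = some (lmax w v)
  unfold lmax
  split_ifs <;> rfl

theorem foldl_bstep_some (l : List (Int × Int)) (w : Int × Int) :
    l.foldl bstep (some w) = some (l.foldl lmax w) := by
  induction l generalizing w with
  | nil => rfl
  | cons x xs ih => simp only [List.foldl_cons, bstep_some, ih]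

theorem lmax_hoist (l : List (Int × Int)) (w a : Int × Int) :
    l.foldl lmax (lmax w a) = lmax w (l.foldl lmax a) := by
  induction l generalizing a with
  | nil => rfl
  | cons x xs ih => simp only [List.foldl_cons, lmax_assoc, ih]

theorem lmax_zero (v : Int × Int) (h : 0 < v.1) : lmax (0, 0) v = v := by
  unfold lmax
  rw [if_pos]
  left; exact h

theorem foldl_bstep_eq (l : List (Int × Int)) (hne : l ≠ [])
    (hpos : ∀ v ∈ l, 0 < v.1) (b : Option (Int × Int)) :
    l.foldl bstep b = bstep b (l.foldl lmax (0, 0)) := by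
  obtain ⟨v, vs, rfl⟩ := List.exists_cons_of_ne_nil hne
  have hz : lmax (0, 0) v = v := lmax_zero v (hpos v (by simp))
  cases b with
  | none =>
    simp only [List.foldl_cons, hz]
    exact foldl_bstep_some vs v
  | some w =>
    simp only [List.foldl_cons, hz, bstep_some]
    rw [foldl_bstep_some, lmax_hoist]

theorem bstep_rcomm (b : Option (Int × Int)) (v w : Int × Int) :
    bstep (bstep b v) w = bstep (bstep b w) v := by
  cases b with
  | none =>
    rw [show bstep none v = some v from rfl, show bstep none w = some w from rfl,
      bstep_some, bstep_some, lmax_comm]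
  | some x =>
    rw [bstep_some, bstep_some, bstep_some, bstep_some, lmax_assoc, lmax_assoc, lmax_comm v w]

theorem pushChildren_eq_mlist (ports : List (Int × Int)) (e : Int) (u : List Int) (l s : Int) :
    pushChildren ports e u l s =
      ((mlist ports e u).map (fun ip => (nxt e ip, chU u ip, l + 1, s + ip.2.1 + ip.2.2))).reverse := by
  rw [pushChildren_eq]
  simp only [List.append_nil]
  rfl

theorem pushChildren_invF (ports : List (Int × Int)) (e : Int) (u : List Int) (l s : Int)
    (hl : l = (u.length : Int)) (hs : s = calc_str ports u) :
    ∀ fr ∈ pushChildren ports e u l s, InvF ports fr := by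
  intro fr hfr
  rw [pushChildren_eq_mlist] at hfr
  simp only [List.mem_reverse, List.mem_map] at hfr
  obtain ⟨ip, hipM, rfl⟩ := hfr
  obtain ⟨k, hk, hip1, hc, hp2, hchU⟩ := mlist_mem ports e u ip hipM
  constructor
  · simp only []
    rw [hchU, hl]
    simp
  · simp only []
    rw [hchU, hs]
    unfold calc_str
    rw [List.foldl_append]
    simp only [List.foldl_cons, List.foldl_nil]
    have : PySem.List.pyGetD ports ((k : Nat) : Int) (0, 0) = ports.getD k (0, 0) :=
      PySem.List.pyGetD_natCast ports k (0, 0)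
    rw [this, ← hp2]

theorem goB_eq (ports : List (Int × Int)) : ∀ (fuel : Nat) (stack : List (Int × List Int × Int × Int))
    (best : Option (Int × Int)),
    ((stack.map (fun fr => (ports.length + 1) ^ ucount ports.length fr.2.1)).sum < fuel) →
    (∀ fr ∈ stack, InvF ports fr) →
    goB ports fuel stack best = finB (stack.foldl (stepB ports) best) := by
  intro fuel
  induction fuel with
  | zero => intro stack best hN _; omega
  | succ fuel ih =>
    intro stack best hN hInv
    match stack with
    | [] => cases best <;> rfl
    | f :: rest =>
      obtain ⟨e, u, l, s⟩ := f
      have hInvf : InvF ports (e, u, l, s) := hInv _ (by simp)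
      have hterm : 1 ≤ (ports.length + 1) ^ ucount ports.length u := Nat.one_le_pow _ _ (by omega)
      by_cases hch : pushChildren ports e u l s = []
      · have hmle : mlist ports e u = [] := by
          rw [pushChildren_eq_mlist] at hch
          simpa using hch
        show (if pushChildren ports e u l s = [] then _ else _) = _
        rw [if_pos hch]
        have hsum : ((rest.map (fun fr => (ports.length + 1) ^ ucount ports.length fr.2.1)).sum) < fuel := by
          simp only [List.map_cons, List.sum_cons] at hN
          omega
        rw [ih rest _ hsum (fun fr hfr => hInv fr (by simp [hfr]))]
        congr 1
        simp only [List.foldl_cons]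
        congr 1
        unfold stepB
        rw [AV_eq, if_pos hmle]
        have h1 : l = (u.length : Int) := hInvf.1
        have h2 : s = calc_str ports u := hInvf.2
        rw [h1, h2]
      · show (if pushChildren ports e u l s = [] then _ else _) = _
        rw [if_neg hch]
        have hmlt := goB_measure_lt ports e u l s rest hch
        have hle : (((pushChildren ports e u l s ++ rest).map
            (fun fr => (ports.length + 1) ^ ucount ports.length fr.2.1)).sum) < fuel := by
          simp only [List.map_cons, List.sum_cons] at hN hmlt ⊢
          omega
        have hInv2 : ∀ fr ∈ pushChildren ports e u l s ++ rest, InvF ports fr := by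
          intro fr hfr
          rcases List.mem_append.mp hfr with h | h
          · exact pushChildren_invF ports e u l s hInvf.1 hInvf.2 fr h
          · exact hInv fr (by simp [h])
        rw [ih _ best hle hInv2]
        rw [List.foldl_append]
        congr 1
        simp only [List.foldl_cons]
        -- children fold collapses to one bstep of the parent's value
        have hmne : mlist ports e u ≠ [] := by
          intro hmle
          rw [pushChildren_eq_mlist, hmle] at hch
          simp at hch
        haveI hrc : RightCommutative (stepB ports) :=
          ⟨fun b v w => by unfold stepB; exact bstep_rcomm b _ _⟩
        rw [pushChildren_eq_mlist]
        rw [List.Perm.foldl_eq (List.reverse_perm _) best]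
        rw [List.foldl_map]
        have h1 : List.foldl (fun (x : Option (Int × Int)) y =>
              stepB ports x (nxt e y, chU u y, l + 1, s + y.2.1 + y.2.2)) best (mlist ports e u)
            = ((mlist ports e u).map (valA ports e u)).foldl bstep best := by
          rw [List.foldl_map]
          apply PySem.List.foldl_congr_mem'
          intro ip _ b
          rfl
        rw [h1]
        have hpos : ∀ v ∈ (mlist ports e u).map (valA ports e u), 0 < v.1 := by
          intro v hv
          obtain ⟨ip, hip, rfl⟩ := List.mem_map.mp hv
          obtain ⟨k, hk, _, hc, _, hchU⟩ := mlist_mem ports e u ip hip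
          have hge : ((chU u ip).length : Int) ≤ (AV ports (nxt e ip) (chU u ip)).2 :=
            AV_snd_ge ports (ucount ports.length (chU u ip)) _ _ (le_refl _)
          have hlen : (chU u ip).length = u.length + 1 := by rw [hchU]; simp
          unfold valA
          simp only []
          omega
        rw [foldl_bstep_eq _ (by simpa using hmne) hpos best]
        unfold stepB
        rw [AV_eq, if_neg hmne]

theorem calc_str_eq_base (ports : List (Int × Int)) (u : List Int) :
    calc_str ports u = baseStr ports u := by
  unfold calc_str baseStr
  have : ∀ (v : List Int) (a : Int), v.foldl (fun S i =>
      S + (PySem.List.pyGetD ports i (0, 0)).1 + (PySem.List.pyGetD ports i (0, 0)).2) a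
      = a + (v.map (fun i => (PySem.List.pyGetD ports i (0, 0)).1 + (PySem.List.pyGetD ports i (0, 0)).2)).sum := by
    intro v
    induction v with
    | nil => intro a; simp
    | cons x xs ihx => intro a; simp [ihx]; ring
  simpa using this u 0

theorem find_ports_spec' (first : Int) (ports : List (Int × Int)) (used : List Int) :
    find_ports first ports used = find_ports_alt first ports used := by
  unfold find_ports_alt
  rw [goB_eq ports _ _ none
    (by simp)
    (by
      intro fr hfr
      simp only [List.mem_singleton] at hfr
      subst hfr
      exact ⟨rfl, (calc_str_eq_base ports used).symm⟩)]
  simp only [List.foldl_cons, List.foldl_nil]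
  unfold stepB bstep finB
  rfl

-- ===== VERDICT (by name: the statement is the Claim_ definition above) =====
theorem find_ports_spec : Claim_equal_find_ports := by
  intro first ports used _ _
  unfold Spec_find_ports
  exact find_ports_spec' first ports used
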